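-- pv_equiv track=rewrite | github.com/vasilypht/crypto-methods | src/crypto/tools/kasiski.py | sequence_counter
-- ===== SOURCE A (Python) =====
-- def sequence_counter(text, seq_len: int = 3, threshold: int = 3):
--     seq_counter = {}
--     for i, letter in enumerate(text):
--         seq = text[i:i + seq_len]
--         if seq in seq_counter.keys():
--             seq_counter[seq].append(i)
--         else:
--             seq_counter[seq] = [i]
--
--     filtered_seq_counter = {key: seq_counter[key] for key in
--                             filter(lambda x: len(seq_counter[x]) >= threshold, seq_counter)}
--     return filtered_seq_counter
-- ===== SOURCE B (Python) =====
-- def sequence_counter(text, seq_len: int = 3, threshold: int = 3):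
--     # Brute force by direct rescans: no accumulator dict at all. For each
--     # substring s (iterated in text order, so first-insertion key order matches),
--     # count its occurrences and gather its positions by scanning the slice list.
--     subs = [text[i:i + seq_len] for i in range(len(text))]
--     return {s: [i for i, t in enumerate(subs) if t == s]
--             for s in subs if subs.count(s) >= threshold}
-- ===== Notes on version B (the rewrite author's own statement) =====
-- stated objective: simpler
-- what changed: A builds a dict of position lists incrementally and then filters it; B keeps no accumulator at all: a single dict comprehension that, for each substring, recomputes its count and its position list by rescanning the slice list (shorter brute-force, quadratic).
import Mathlib
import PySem

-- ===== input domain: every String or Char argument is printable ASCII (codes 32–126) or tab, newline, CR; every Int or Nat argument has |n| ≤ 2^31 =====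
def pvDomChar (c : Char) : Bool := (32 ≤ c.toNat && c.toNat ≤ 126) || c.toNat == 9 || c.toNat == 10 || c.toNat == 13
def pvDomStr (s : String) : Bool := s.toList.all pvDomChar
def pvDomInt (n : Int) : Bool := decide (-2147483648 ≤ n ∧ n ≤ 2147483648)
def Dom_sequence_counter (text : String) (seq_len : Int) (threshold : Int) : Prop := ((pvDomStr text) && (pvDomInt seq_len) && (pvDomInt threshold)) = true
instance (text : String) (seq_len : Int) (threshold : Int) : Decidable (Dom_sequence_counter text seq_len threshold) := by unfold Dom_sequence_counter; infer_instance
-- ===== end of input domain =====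

-- B replaces A's incremental dict-of-position-lists-then-filter by a single brute-force dict
-- comprehension that rescans the slice list per substring (shorter; same return value).

-- ===== PORT A =====
def sequence_counter (text : String) (seq_len : Int) (threshold : Int) : List (String × List Int) :=
  -- for i, letter in enumerate(text): seq = text[i:i+seq_len]; append i / start [i]
  let seq_counter : PySem.Dict String (List Int) :=
    (PySem.List.enumerate text.toList 0).foldl
      (fun d p =>
        let seq := PySem.Str.slice text (some p.1) (some (p.1 + seq_len))
        if d.contains seq then d.modify seq [] (· ++ [p.1]) else d.insert seq [p.1])
      PySem.Dict.empty
  -- {key: seq_counter[key] for key in filter(lambda x: len(seq_counter[x]) >= threshold, seq_counter)}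
  -- (seq_counter[key] with key known present is ported as getD key [])
  ((seq_counter.keys.filter
      (fun k => decide (threshold ≤ ((seq_counter.getD k []).length : Int)))).foldl
    (fun r k => r.insert k (seq_counter.getD k [])) PySem.Dict.empty).items

-- ===== PORT B =====
def sequence_counter_alt (text : String) (seq_len : Int) (threshold : Int) : List (String × List Int) :=
  -- subs = [text[i:i+seq_len] for i in range(len(text))]
  let subs : List String :=
    (PySem.List.pyRange 0 (PySem.Str.len text) 1).map
      (fun i => PySem.Str.slice text (some i) (some (i + seq_len)))
  -- {s: [i for i, t in enumerate(subs) if t == s] for s in subs if subs.count(s) >= threshold}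
  -- (dict comprehension: duplicate keys overwrite in place, so Dict.insert in a fold is exact)
  (subs.foldl
    (fun d s =>
      if decide (threshold ≤ (PySem.List.count subs s : Int)) then
        d.insert s (((PySem.List.enumerate subs 0).filter (fun p => p.2 == s)).map (fun p => p.1))
      else d)
    PySem.Dict.empty).items

-- ===== PRECONDITION & SPEC =====
def Spec_sequence_counter (text : String) (seq_len : Int) (threshold : Int) (out : List (String × List Int)) : Prop := out = sequence_counter_alt text seq_len threshold
instance (text : String) (seq_len : Int) (threshold : Int) (out : List (String × List Int)) : Decidable (Spec_sequence_counter text seq_len threshold out) := by unfold Spec_sequence_counter; infer_instance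

-- ===== CLAIM (what is proved, stated in full; the proofs are below) =====
def Claim_equal_sequence_counter : Prop := ∀ (text : String) (seq_len : Int) (threshold : Int), Dom_sequence_counter text seq_len threshold → Spec_sequence_counter text seq_len threshold (sequence_counter text seq_len threshold)

-- ===== LEMMAS AND PROOFS =====

def pvSq (text : String) (seq_len : Int) (i : Int) : String :=
  PySem.Str.slice text (some i) (some (i + seq_len))
def pvR (text : String) : List Int := PySem.List.pyRange 0 ((text.toList.length : Int)) 1
def pvPs (text : String) (seq_len : Int) : List (String × Int) :=
  (pvR text).map (fun i => (pvSq text seq_len i, i))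
def pvKeys (text : String) (seq_len : Int) : List String := (pvR text).map (pvSq text seq_len)

theorem pv_stepA_eq (d : PySem.Dict String (List Int)) (k : String) (i : Int) :
    (if d.contains k then d.modify k [] (· ++ [i]) else d.insert k [i]) = d.modify k [] (· ++ [i]) := by
  by_cases h : d.contains k = true
  · simp [h]
  · simp only [Bool.not_eq_true] at h
    simp [h, PySem.Dict.modify, PySem.Dict.getD_of_not_contains _ _ h]

theorem pv_foldl_enum {γ : Type} (F : γ → Int → γ) :
    ∀ (cs : List Char) (s : Int) (e : γ),
    (PySem.List.enumerate cs s).foldl (fun d p => F d p.1) e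
      = (PySem.List.pyRange s (s + cs.length) 1).foldl F e := by
  intro cs
  induction cs with
  | nil => intro s e; simp [PySem.List.enumerate_nil, PySem.List.pyRange_one_eq_nil]
  | cons c t ih =>
    intro s e
    rw [PySem.List.enumerate_cons, PySem.List.pyRange_one_cons (by simp only [List.length_cons]; push_cast; omega)]
    simp only [List.foldl_cons, ih]
    norm_num
    rw [show s + (↑t.length + 1) = s + 1 + ↑t.length by ring]

theorem pv_dA (text : String) (sl : Int) :
    (PySem.List.enumerate text.toList 0).foldl
      (fun d p =>
        let seq := PySem.Str.slice text (some p.1) (some (p.1 + sl))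
        if d.contains seq then d.modify seq [] (· ++ [p.1]) else d.insert seq [p.1])
      PySem.Dict.empty
    = (pvPs text sl).foldl (fun d p => d.modify p.1 [] (· ++ [p.2])) PySem.Dict.empty := by
  refine (pv_foldl_enum (F := fun d i =>
      if d.contains (PySem.Str.slice text (some i) (some (i + sl)))
      then d.modify (PySem.Str.slice text (some i) (some (i + sl))) [] (· ++ [i])
      else d.insert (PySem.Str.slice text (some i) (some (i + sl))) [i]) text.toList 0 PySem.Dict.empty).trans ?_
  have hF : (fun (d : PySem.Dict String (List Int)) (i : Int) =>
      if d.contains (PySem.Str.slice text (some i) (some (i + sl)))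
      then d.modify (PySem.Str.slice text (some i) (some (i + sl))) [] (· ++ [i])
      else d.insert (PySem.Str.slice text (some i) (some (i + sl))) [i])
      = (fun d i => d.modify (pvSq text sl i) [] (· ++ [i])) := by
    funext d i; exact pv_stepA_eq d (pvSq text sl i) i
  rw [hF]
  simp only [pvPs, List.foldl_map, zero_add, pvR]

theorem pv_dA_getD (text : String) (sl : Int) (c : String) :
    ((pvPs text sl).foldl (fun d p => d.modify p.1 [] (· ++ [p.2])) PySem.Dict.empty).getD c []
      = ((pvPs text sl).filter (fun p => p.1 == c)).map (fun p => p.2) := by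
  rw [PySem.Dict.getD_foldl_modify_append]
  simp

theorem pv_dA_len (text : String) (sl th : Int) (c : String) :
    decide (th ≤ ((((pvPs text sl).foldl (fun d p => d.modify p.1 [] (· ++ [p.2])) PySem.Dict.empty).getD c []).length : Int))
      = decide (th ≤ (List.count c (pvKeys text sl) : Int)) := by
  rw [pv_dA_getD]
  congr 1
  rw [List.length_map, ← List.countP_eq_length_filter, pvPs, List.countP_map, pvKeys, List.count_eq_countP, List.countP_map]
  rfl

theorem pv_items_map (g : String → List Int) (l : List String) (hnd : l.Nodup) :
    ((l.foldl (fun r k => r.insert k (g k)) PySem.Dict.empty).items) = l.map (fun k => (k, g k)) := by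
  have h := PySem.Dict.items_foldl_insert_fresh l (fun a => a) g PySem.Dict.empty
    (fun a _ => PySem.Dict.contains_empty a) (by rw [List.map_id']; exact hnd)
  exact h.trans (by rw [show (PySem.Dict.empty : PySem.Dict String (List Int)).items = [] from rfl, List.nil_append])

theorem pv_dA_items (text : String) (sl : Int) (P : String → Bool) :
    (((((pvPs text sl).foldl (fun d p => d.modify p.1 [] (· ++ [p.2])) PySem.Dict.empty).keys.filter P).foldl
        (fun r k => r.insert k
          (((pvPs text sl).foldl (fun d p => d.modify p.1 [] (· ++ [p.2])) PySem.Dict.empty).getD k []))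
        PySem.Dict.empty).items)
      = ((PySem.Set.ofList (pvKeys text sl)).filter P).map
          (fun k => (k, ((pvPs text sl).filter (fun p => p.1 == k)).map (fun p => p.2))) := by
  have hnodA : (((pvPs text sl).foldl (fun d p => d.modify p.1 [] (· ++ [p.2])) PySem.Dict.empty)).keys.Nodup :=
    PySem.Dict.nodup_keys_foldl_modify_key _ Prod.fst [] (fun d p v => v ++ [p.2]) _
      (by rw [PySem.Dict.keys_empty]; exact List.nodup_nil)
  have hkeysA : (((pvPs text sl).foldl (fun d p => d.modify p.1 [] (· ++ [p.2])) PySem.Dict.empty)).keys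
      = PySem.Set.ofList (pvKeys text sl) := by
    have h := PySem.Dict.keys_foldl_modify_key (pvPs text sl)
      Prod.fst ([] : List Int) (fun d p v => v ++ [p.2]) PySem.Dict.empty
    rw [h, PySem.Dict.keys_empty]
    show PySem.Set.ofList _ = _
    rw [show (pvPs text sl).map Prod.fst = pvKeys text sl by
      simp [pvPs, pvKeys, List.map_map]]
  rw [pv_items_map _ _ (List.Nodup.filter P hnodA), hkeysA]
  refine List.map_congr_left ?_
  intro k hk
  rw [pv_dA_getD]

-- B-side: a conditional-insert fold with key-determined values, as a map over the deduped filtered keys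
theorem pv_items_foldl_insert_cond (P : String → Bool) (g : String → List Int) :
    ∀ (l : List String),
    ((l.foldl (fun d s => if P s then d.insert s (g s) else d) PySem.Dict.empty).items)
      = ((PySem.Set.ofList l).filter P).map (fun k => (k, g k)) := by
  intro l
  induction l using List.reverseRecOn with
  | nil => rfl
  | append_singleton l x ih =>
    rw [List.foldl_append, List.foldl_cons, List.foldl_nil,
      PySem.Set.ofList_append_singleton, PySem.Set.add_eq_ite]
    by_cases hP : P x = true
    · rw [if_pos hP]
      by_cases hm : x ∈ PySem.Set.ofList l
      · rw [if_pos hm]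
        have hcont : (l.foldl (fun d s => if P s then d.insert s (g s) else d) PySem.Dict.empty).contains x = true := by
          rw [PySem.Dict.contains_eq_decide_mem_keys]
          have : (l.foldl (fun d s => if P s then d.insert s (g s) else d) PySem.Dict.empty).keys
              = ((PySem.Set.ofList l).filter P).map (fun k => k) := by
            rw [PySem.Dict.keys, ih, List.map_map]; rfl
          rw [this]
          simp [List.mem_filter, hm, hP]
        rw [PySem.Dict.items_insert_of_contains _ _ hcont, ih, List.map_map]
        refine List.map_congr_left ?_
        intro k hkmem
        by_cases hkx : (k == x) = true
        · have : k = x := by simpa using hkx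
          simp [Function.comp, this]
        · simp [Function.comp, hkx]
      · rw [if_neg hm]
        have hnc : (l.foldl (fun d s => if P s then d.insert s (g s) else d) PySem.Dict.empty).contains x = false := by
          rw [PySem.Dict.contains_eq_decide_mem_keys]
          have : (l.foldl (fun d s => if P s then d.insert s (g s) else d) PySem.Dict.empty).keys
              = ((PySem.Set.ofList l).filter P).map (fun k => k) := by
            rw [PySem.Dict.keys, ih, List.map_map]; rfl
          rw [this]
          simp only [decide_eq_false_iff_not, List.map_id']
          intro hmem
          exact hm (List.mem_of_mem_filter hmem)
        rw [PySem.Dict.items_insert_of_not_contains _ _ hnc, ih,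
          List.filter_append, List.filter_singleton, hP, cond_true, List.map_append]
        rfl
    · rw [Bool.not_eq_true] at hP
      rw [hP, if_neg (by simp)]
      by_cases hm : x ∈ PySem.Set.ofList l
      · rw [if_pos hm, ih]
      · rw [if_neg hm, ih, List.filter_append, List.filter_singleton, hP, cond_false, List.append_nil]

theorem pv_enum_map {α β : Type} (f : α → β) :
    ∀ (l : List α) (s : Int),
    PySem.List.enumerate (l.map f) s = (PySem.List.enumerate l s).map (fun p => (p.1, f p.2)) := by
  intro l
  induction l with
  | nil => intro s; simp [PySem.List.enumerate_nil]
  | cons a t ih => intro s; simp [PySem.List.enumerate_cons, ih]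

theorem pv_enum_range : ∀ (m : Nat) (s : Int),
    PySem.List.enumerate (PySem.List.pyRange s (s + m) 1) s
      = (PySem.List.pyRange s (s + m) 1).map (fun j => (j, j)) := by
  intro m
  induction m with
  | zero => intro s; simp [PySem.List.pyRange_one_eq_nil, PySem.List.enumerate_nil]
  | succ n ih =>
    intro s
    rw [PySem.List.pyRange_one_cons (by push_cast; omega)]
    rw [PySem.List.enumerate_cons, List.map_cons]
    push_cast
    rw [show s + ((n : Int) + 1) = (s + 1) + (n : Int) by ring, ih (s + 1)]

theorem pv_gB_eq_gA (text : String) (sl : Int) (k : String) :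
    ((PySem.List.enumerate (pvKeys text sl) 0).filter (fun p => p.2 == k)).map (fun p => p.1)
      = ((pvPs text sl).filter (fun p => p.1 == k)).map (fun p => p.2) := by
  have henum : PySem.List.enumerate (pvKeys text sl) 0
      = (pvR text).map (fun j => (j, pvSq text sl j)) := by
    rw [pvKeys, pv_enum_map]
    have h0 : (0 : Int) + ((text.toList.length : Nat) : Int) = (text.toList.length : Int) := by ring
    rw [pvR, show PySem.List.pyRange 0 ((text.toList.length : Nat) : Int) 1
        = PySem.List.pyRange 0 (0 + ((text.toList.length : Nat) : Int)) 1 by rw [h0]]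
    rw [pv_enum_range text.toList.length 0, List.map_map]
    rfl
  rw [henum, pvPs, List.filter_map, List.filter_map, List.map_map, List.map_map]
  rfl

theorem pv_main (text : String) (sl th : Int) :
    sequence_counter text sl th = sequence_counter_alt text sl th := by
  unfold sequence_counter sequence_counter_alt
  simp only [pv_dA, pv_dA_len]
  rw [pv_dA_items text sl (fun k => decide (th ≤ ((List.count k (pvKeys text sl) : Int))))]
  have hsubs : (PySem.List.pyRange 0 (PySem.Str.len text) 1).map
      (fun i => PySem.Str.slice text (some i) (some (i + sl))) = pvKeys text sl := rfl
  rw [hsubs, pv_items_foldl_insert_cond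
      (fun s => decide (th ≤ (PySem.List.count (pvKeys text sl) s : Int)))
      (fun s => ((PySem.List.enumerate (pvKeys text sl) 0).filter (fun p => p.2 == s)).map (fun p => p.1))
      (pvKeys text sl)]
  have hP : (fun s => decide (th ≤ (PySem.List.count (pvKeys text sl) s : Int)))
      = (fun k => decide (th ≤ ((List.count k (pvKeys text sl) : Int)))) := by
    funext s; rw [PySem.List.count_eq]
  rw [hP]
  refine (List.map_congr_left ?_).symm
  intro k _
  rw [pv_gB_eq_gA]

-- ===== VERDICT (by name: the statement is the Claim_ definition above) =====
theorem sequence_counter_spec : Claim_equal_sequence_counter := by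
  intro text sl th _
  unfold Spec_sequence_counter
  exact pv_main text sl th
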